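-- pv_equiv track=rewrite | github.com/pypi-data/pypi-mirror-404 | packages/anatomize/anatomize-0.2.0.tar.gz/anatomize-0.2.0/src/anatomize/pack/tree.py | render_structure_tree
-- ===== SOURCE A (Python) =====
-- from typing import TypeAlias, Union, cast
--
-- StructureTree: TypeAlias = dict[str, Union[None, "StructureTree"]]
--
-- def render_structure_tree(paths: list[tuple[str, bool]]) -> list[str]:
--     """Render a directory structure tree from (rel_posix, is_dir) items."""
--     tree: StructureTree = {}
--     for rel_posix, is_dir in sorted(paths, key=lambda x: x[0]):
--         parts = [x for x in rel_posix.split("/") if x and x != "."]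
--         if not parts:
--             continue
--         node: StructureTree = tree
--         for part in parts[:-1]:
--             child = node.get(part)
--             if isinstance(child, dict):
--                 node = child
--                 continue
--             new_child: StructureTree = {}
--             node[part] = new_child
--             node = new_child
--
--         leaf = parts[-1]
--         existing = node.get(leaf)
--         if is_dir:
--             if existing is None:
--                 node[leaf] = {}
--         else:
--             if existing is None:
--                 node[leaf] = None
--
--     lines: list[str] = []
--
--     def walk(node: StructureTree, prefix: str) -> None:
--         for name in sorted(node.keys()):
--             child = node[name]
--             if isinstance(child, dict):
--                 lines.append(f"{prefix}{name}/")
--                 walk(child, prefix + "  ")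
--             else:
--                 lines.append(f"{prefix}{name}")
--
--     walk(tree, "")
--     return lines
-- ===== SOURCE B (Python) =====
-- def render_structure_tree(paths: list[tuple[str, bool]]) -> list[str]:
--     """Render a directory structure tree from (rel_posix, is_dir) items.
--
--     Flat one-pass version: instead of building a nested dict tree and walking it
--     recursively, record every path-prefix tuple in ONE flat dict mapping it to a
--     directory flag (a prefix is a directory iff it is a proper prefix of some
--     path, or some path lists it with is_dir=True), then emit the lines in one
--     sweep over the sorted keys -- tuple order equals the tree's DFS pre-order.
--     """
--     nodes: dict[tuple[str, ...], bool] = {}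
--     for rel_posix, is_dir in paths:
--         parts = [x for x in rel_posix.split("/") if x and x != "."]
--         t = ()
--         for part in parts:
--             t = t + (part,)
--             nodes[t] = nodes.get(t, False) or len(t) < len(parts) or is_dir
--     return [
--         "  " * (len(t) - 1) + t[-1] + ("/" if nodes[t] else "")
--         for t in sorted(nodes)
--     ]
-- ===== Notes on version B (the rewrite author's own statement) =====
-- stated objective: alternative
-- what changed: Replaced A's mutable nested-dict tree build plus recursive per-level-sorted walk by one flat dict mapping every path-prefix tuple to a directory flag, emitted in a single sweep over the sorted keys (tuple order equals the DFS pre-order).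
import Mathlib
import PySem

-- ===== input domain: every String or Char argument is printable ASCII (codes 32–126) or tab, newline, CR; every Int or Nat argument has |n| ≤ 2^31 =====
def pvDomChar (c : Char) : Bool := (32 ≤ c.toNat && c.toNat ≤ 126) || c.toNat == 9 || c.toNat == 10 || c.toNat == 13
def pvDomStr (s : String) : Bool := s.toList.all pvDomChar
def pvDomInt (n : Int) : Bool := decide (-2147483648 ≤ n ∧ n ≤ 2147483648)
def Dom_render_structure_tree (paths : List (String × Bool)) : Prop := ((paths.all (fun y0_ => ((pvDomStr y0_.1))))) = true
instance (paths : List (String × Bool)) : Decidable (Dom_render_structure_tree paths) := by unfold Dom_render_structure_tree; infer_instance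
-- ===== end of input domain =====

-- B replaces A's mutable nested-dict tree + recursive per-level-sorted walk by ONE flat
-- dict from path-prefix tuples to a directory flag, emitted in one sweep over the sorted
-- keys (tuple order = DFS pre-order); objective: alternative/simpler, not claimed faster.

-- ===== PORT A =====
-- shared helper: parts = [x for x in rel_posix.split("/") if x and x != "."]
-- (s.split("/") is PySem.Str.split?; the separator "/" is non-empty so it never returns none)
def pvParts (s : String) : List String :=
  ((PySem.Str.split? s "/").getD []).filter (fun x => decide (x ≠ "" ∧ x ≠ "."))

-- A's StructureTree = dict[str, None | StructureTree] in insertion order, encoded as the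
-- sibling list itself: `file n rest` = entry n ↦ None, `dir n c rest` = entry n ↦ c.
inductive STree where
  | nil : STree
  | file : String → STree → STree
  | dir : String → STree → STree → STree
deriving DecidableEq, Repr

-- A's per-path insertion loop (descend over parts[:-1], then the leaf cases), as a
-- functional rebuild of the in-place mutation: replaced entries keep their position,
-- new entries are appended at the end, exactly as a Python dict behaves.
def insPath : STree → List String → Bool → STree
  | t, [], _ => t
  | STree.nil, x :: xs, d =>
      if xs = [] then (if d then STree.dir x STree.nil STree.nil else STree.file x STree.nil)
      else STree.dir x (insPath STree.nil xs d) STree.nil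
  | STree.file n rest, x :: xs, d =>
      if x = n then
        (if xs = [] then (if d then STree.dir n STree.nil rest else STree.file n rest)
         else STree.dir n (insPath STree.nil xs d) rest)
      else STree.file n (insPath rest (x :: xs) d)
  | STree.dir n c rest, x :: xs, d =>
      if x = n then
        (if xs = [] then STree.dir n c rest else STree.dir n (insPath c xs d) rest)
      else STree.dir n c (insPath rest (x :: xs) d)
termination_by t parts _ => (parts.length, sizeOf t)

-- the (name, child) items of one dict level, in insertion order
def entries : STree → List (String × Option STree)
  | STree.nil => []
  | STree.file n r => (n, none) :: entries r
  | STree.dir n c r => (n, some c) :: entries r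

-- termination helpers for walkGo (children are structurally smaller)
def tsize : STree → Nat
  | STree.nil => 1
  | STree.file _ r => 1 + tsize r
  | STree.dir _ c r => 1 + tsize c + tsize r

def entSize (e : String × Option STree) : Nat :=
  match e.2 with
  | none => 1
  | some c => 1 + tsize c

theorem entries_measure : ∀ t : STree, ((entries t).map entSize).sum ≤ tsize t := by
  intro t
  induction t with
  | nil => simp [entries, tsize]
  | file n r ih =>
      simp only [entries, List.map_cons, List.sum_cons, entSize, tsize]
      omega
  | dir n c r _ ihr =>
      simp only [entries, List.map_cons, List.sum_cons, entSize, tsize]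
      omega

theorem sorted_entries_measure (c : STree) :
    ((PySem.List.sorted (entries c) (fun e => e.1) false).map entSize).sum
      = ((entries c).map entSize).sum :=
  List.Perm.sum_eq (List.Perm.map _ (PySem.List.sorted_perm _ _ _))

-- A's walk: `for name in sorted(node.keys()): child = node[name] ...` — one pass over the
-- items of a level sorted by name (dict keys are unique, Python str `<` is Lean's `<`),
-- appending the line and, for a sub-dict, the recursive walk with prefix + "  ".
def walkGo : List (String × Option STree) → String → List String
  | [], _ => []
  | (n, none) :: rest, pre => (pre ++ n) :: walkGo rest pre
  | (n, some c) :: rest, pre =>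
      (pre ++ n ++ "/") ::
        (walkGo (PySem.List.sorted (entries c) (fun e => e.1) false) (pre ++ "  ") ++
          walkGo rest pre)
termination_by l _ => (l.map entSize).sum
decreasing_by
  all_goals first
    | (rw [sorted_entries_measure]
       have h2 := entries_measure c
       simp only [List.map_cons, List.sum_cons, entSize]
       omega)
    | (simp only [List.map_cons, List.sum_cons, entSize]
       omega)

def walk (t : STree) (pre : String) : List String :=
  walkGo (PySem.List.sorted (entries t) (fun e => e.1) false) pre

def render_structure_tree (paths : List (String × Bool)) : List String :=
  let tree := (PySem.List.sorted paths (fun x => x.1) false).foldl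
      (fun tr p => insPath tr (pvParts p.1) p.2) STree.nil
  walk tree ""

-- ===== PORT B =====
-- hand port of Python's '"  " * n' (string repetition)
def pvSpaces : Nat → String
  | 0 => ""
  | n + 1 => "  " ++ pvSpaces n

-- B's inner loop: grow the prefix tuple t and OR the directory flag into nodes[t]
def addPath (nodes : PySem.Dict (List String) Bool) (parts : List String) (is_dir : Bool) :
    PySem.Dict (List String) Bool :=
  (parts.foldl (fun s x =>
      let t := s.1 ++ [x]
      (t, s.2.insert t ((s.2.getD t false || decide (t.length < parts.length)) || is_dir)))
    (([] : List String), nodes)).2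

-- t[-1] is PySem.List.pyGet? t (-1); every key is a non-empty prefix, so it is never none
-- (Python would raise IndexError only on an empty tuple, which never becomes a key)
def render_structure_tree_alt (paths : List (String × Bool)) : List String :=
  let nodes := paths.foldl (fun d p => addPath d (pvParts p.1) p.2) PySem.Dict.empty
  (PySem.List.sorted nodes.keys (fun t => t) false).map (fun t =>
    pvSpaces (t.length - 1) ++ (PySem.List.pyGet? t (-1)).getD "" ++
      (if nodes.getD t false then "/" else ""))

-- ===== PRECONDITION & SPEC =====
def Spec_render_structure_tree (paths : List (String × Bool)) (out : List String) : Prop := out = render_structure_tree_alt paths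
instance (paths : List (String × Bool)) (out : List String) : Decidable (Spec_render_structure_tree paths out) := by unfold Spec_render_structure_tree; infer_instance

-- ===== CLAIM (what is proved, stated in full; the proofs are below) =====
def Claim_equal_render_structure_tree : Prop := ∀ (paths : List (String × Bool)), Dom_render_structure_tree paths → Spec_render_structure_tree paths (render_structure_tree paths)

-- ===== LEMMAS AND PROOFS =====

-- first-match lookup of a full path in A's tree: some b = present with directory flag b
def lookup : STree → List String → Option Bool
  | _, [] => none
  | STree.nil, _ :: _ => none
  | STree.file n r, x :: xs =>
      if x = n then (if xs = [] then some false else none) else lookup r (x :: xs)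
  | STree.dir n c r, x :: xs =>
      if x = n then (if xs = [] then some true else lookup c xs) else lookup r (x :: xs)

def names (t : STree) : List String := (entries t).map (fun e => e.1)

-- well-formedness: sibling names are distinct on every level (a dict invariant)
def WF : STree → Prop
  | STree.nil => True
  | STree.file n r => n ∉ names r ∧ WF r
  | STree.dir n c r => n ∉ names r ∧ (WF c ∧ WF r)

-- all paths stored in the tree (in tree order; used only up to permutation)
def allPaths : STree → List (List String)
  | STree.nil => []
  | STree.file n r => [n] :: allPaths r
  | STree.dir n c r => [n] :: ((allPaths c).map (fun q => n :: q) ++ allPaths r)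

-- p is a non-empty prefix of q
def isPfx (p q : List String) : Bool :=
  decide (p ≠ []) && (decide (p.length ≤ q.length) && decide (p = q.take p.length))

-- extensional description of the final structure, independent of processing order
def specMem (L : List (String × Bool)) (p : List String) : Bool :=
  L.any (fun e => isPfx p (pvParts e.1))
def specDir (L : List (String × Bool)) (p : List String) : Bool :=
  L.any (fun e => isPfx p (pvParts e.1) &&
    (decide (p.length < (pvParts e.1).length) || e.2))

-- the block of output paths contributed by one entry (P: tree order, S: sorted order)
def blockP (e : String × Option STree) : List (List String) :=
  match e.2 with
  | none => [[e.1]]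
  | some c => [e.1] :: (allPaths c).map (fun q => e.1 :: q)

def blockS (e : String × Option STree) : List (List String) :=
  match e.2 with
  | none => [[e.1]]
  | some c => [e.1] :: (PySem.List.sorted (allPaths c) (fun q => q) false).map (fun q => e.1 :: q)

theorem tsize_of_mem_entries : ∀ {t : STree} {n : String} {c : STree},
    (n, some c) ∈ entries t → tsize c < tsize t := by
  intro t
  induction t with
  | nil => intro n c h; simp [entries] at h
  | file m r ih =>
      intro n c h
      simp only [entries, List.mem_cons, Prod.mk.injEq] at h
      rcases h with ⟨-, h2⟩ | h
      · exact absurd h2 (by simp)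
      · have := ih h
        simp only [tsize]
        omega
  | dir m c' r _ ihr =>
      intro n c h
      simp only [entries, List.mem_cons, Prod.mk.injEq, Option.some.injEq] at h
      rcases h with ⟨-, h2⟩ | h
      · subst h2
        simp only [tsize]
        omega
      · have := ihr h
        simp only [tsize]
        omega

theorem lookup_nil (p : List String) : lookup STree.nil p = none := by
  cases p <;> simp [lookup]

theorem lookup_nil_path (t : STree) : lookup t [] = none := by
  cases t <;> simp [lookup]

theorem some_beq_some_true (b : Bool) : ((some b : Option Bool) == some true) = b := by
  cases b <;> rfl

theorem none_beq_some_true : ((none : Option Bool) == some true) = false := rfl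

theorem isPfx_nil_left (q : List String) : isPfx [] q = false := by
  simp [isPfx]

theorem isPfx_nil_right (p : List String) : isPfx p [] = false := by
  cases p <;> simp [isPfx]

theorem isPfx_iff (p q : List String) :
    isPfx p q = true ↔ p ≠ [] ∧ (p.length ≤ q.length ∧ p = q.take p.length) := by
  simp [isPfx]

theorem isPfx_cons_cons (y x : String) (ys xs : List String) :
    isPfx (y :: ys) (x :: xs) = (decide (y = x) && (decide (ys = []) || isPfx ys xs)) := by
  rw [Bool.eq_iff_iff]
  simp only [isPfx, Bool.and_eq_true, Bool.or_eq_true, decide_eq_true_eq, ne_eq]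
  constructor
  · rintro ⟨-, hlen, heq⟩
    simp only [List.length_cons, List.take_succ_cons, List.cons.injEq] at heq hlen
    obtain ⟨h1, h2⟩ := heq
    refine ⟨h1, ?_⟩
    rcases eq_or_ne ys [] with hys | hys
    · exact Or.inl hys
    · exact Or.inr ⟨hys, by omega, h2⟩
  · rintro ⟨h1, h2 | ⟨h2, h3, h4⟩⟩
    · subst h2
      refine ⟨by simp, by simp, by simp [h1]⟩
    · refine ⟨by simp, by simp; omega, ?_⟩
      simp only [List.length_cons, List.take_succ_cons, List.cons.injEq]
      exact ⟨h1, h4⟩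

set_option maxHeartbeats 1000000 in
theorem lookup_ins : ∀ (parts : List String) (t : STree) (d : Bool) (p : List String),
    lookup (insPath t parts d) p =
      if isPfx p parts then
        some ((lookup t p == some true) || (decide (p.length < parts.length) || d))
      else lookup t p := by
  intro parts
  induction parts with
  | nil =>
      intro t d p
      simp [insPath, isPfx_nil_right]
  | cons x xs ih =>
      intro t d p
      induction t with
      | nil =>
          rcases p with _ | ⟨y, ys⟩
          · by_cases hxs : xs = [] <;> cases d <;>
              simp [insPath, hxs, lookup_nil_path, isPfx_nil_left]
          · by_cases hxs : xs = []
            · subst hxs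
              by_cases hyx : y = x
              · subst hyx
                cases d <;> rcases ys with _ | ⟨z, zs⟩ <;>
                  (simp [insPath, lookup, isPfx_cons_cons, isPfx_nil_left, isPfx_nil_right,
                    lookup_nil]; try rfl)
              · cases d <;>
                  (simp [insPath, lookup, isPfx_cons_cons, hyx, lookup_nil]; try rfl)
            · by_cases hyx : y = x
              · subst hyx
                rcases ys with _ | ⟨z, zs⟩
                · simp [insPath, hxs, lookup, isPfx_cons_cons, lookup_nil, isPfx_nil_right,
                    Nat.pos_iff_ne_zero, List.length_eq_zero_iff]
                · (simp [insPath, hxs, lookup, isPfx_cons_cons, ih, lookup_nil,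
                    isPfx_nil_right, Nat.add_lt_add_iff_right]; try rfl)
              · (simp [insPath, hxs, lookup, isPfx_cons_cons, hyx, lookup_nil]; try rfl)
      | file n r ihr =>
          rcases p with _ | ⟨y, ys⟩
          · by_cases hxn : x = n <;> by_cases hxs : xs = [] <;> cases d <;>
              simp [insPath, hxn, hxs, lookup_nil_path, isPfx_nil_left]
          · by_cases hxn : x = n
            · subst hxn
              by_cases hyx : y = x
              · subst hyx
                rcases ys with _ | ⟨z, zs⟩
                · by_cases hxs : xs = [] <;> cases d <;>
                    (simp [insPath, hxs, lookup, isPfx_cons_cons, lookup_nil, isPfx_nil_right,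
                      Nat.pos_iff_ne_zero, List.length_eq_zero_iff]; try rfl)
                · by_cases hxs : xs = [] <;> cases d <;>
                    (simp [insPath, hxs, lookup, isPfx_cons_cons, ih, lookup_nil,
                      isPfx_nil_right, Nat.add_lt_add_iff_right]; try rfl)
              · by_cases hxs : xs = [] <;> cases d <;>
                  (simp [insPath, hxs, lookup, isPfx_cons_cons, hyx, lookup_nil]; try rfl)
            · by_cases hyx : y = x
              · subst hyx
                have hyn : ¬ (y = n) := hxn
                (simp [insPath, hxn, lookup, isPfx_cons_cons, hyn, ihr]; try rfl)
              · by_cases hyn : y = n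
                · subst hyn
                  (simp [insPath, hxn, lookup, isPfx_cons_cons, hyx, ihr,
                    (show ¬ (y = x) from hyx)]; try rfl)
                · (simp [insPath, hxn, lookup, isPfx_cons_cons, hyx, hyn, ihr]; try rfl)
      | dir n c r _ ihr =>
          rcases p with _ | ⟨y, ys⟩
          · by_cases hxn : x = n <;> by_cases hxs : xs = [] <;> cases d <;>
              simp [insPath, hxn, hxs, lookup_nil_path, isPfx_nil_left]
          · by_cases hxn : x = n
            · subst hxn
              by_cases hyx : y = x
              · subst hyx
                rcases ys with _ | ⟨z, zs⟩
                · by_cases hxs : xs = [] <;> cases d <;>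
                    (simp [insPath, hxs, lookup, isPfx_cons_cons, lookup_nil, isPfx_nil_right,
                      Nat.pos_iff_ne_zero, List.length_eq_zero_iff]; try rfl)
                · by_cases hxs : xs = [] <;> cases d <;>
                    (simp [insPath, hxs, lookup, isPfx_cons_cons, ih, lookup_nil,
                      isPfx_nil_right, Nat.add_lt_add_iff_right]; try rfl)
              · by_cases hxs : xs = [] <;> cases d <;>
                  (simp [insPath, hxs, lookup, isPfx_cons_cons, hyx, lookup_nil]; try rfl)
            · by_cases hyx : y = x
              · subst hyx
                have hyn : ¬ (y = n) := hxn
                (simp [insPath, hxn, lookup, isPfx_cons_cons, hyn, ihr]; try rfl)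
              · by_cases hyn : y = n
                · subst hyn
                  (simp [insPath, hxn, lookup, isPfx_cons_cons, hyx, ihr,
                    (show ¬ (y = x) from hyx)]; try rfl)
                · (simp [insPath, hxn, lookup, isPfx_cons_cons, hyx, hyn, ihr]; try rfl)

theorem names_ins : ∀ (t : STree) (x : String) (xs : List String) (d : Bool),
    names (insPath t (x :: xs) d) =
      if x ∈ names t then names t else names t ++ [x] := by
  intro t
  induction t with
  | nil =>
      intro x xs d
      by_cases hxs : xs = [] <;> cases d <;>
        simp [insPath, hxs, names, entries]
  | file n r ihr =>
      intro x xs d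
      by_cases hxn : x = n
      · subst hxn
        by_cases hxs : xs = [] <;> cases d <;>
          simp [insPath, hxs, names, entries]
      · have hins : insPath (STree.file n r) (x :: xs) d
            = STree.file n (insPath r (x :: xs) d) := by
          simp [insPath, hxn]
        have hnf : names (STree.file n (insPath r (x :: xs) d))
            = n :: names (insPath r (x :: xs) d) := rfl
        have hn0 : names (STree.file n r) = n :: names r := rfl
        rw [hins, hnf, hn0, ihr x xs d]
        by_cases hm : x ∈ names r
        · rw [if_pos hm, if_pos (by simp [hm])]
        · rw [if_neg hm, if_neg (by simp [hxn, hm]), List.cons_append]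
  | dir n c r _ ihr =>
      intro x xs d
      by_cases hxn : x = n
      · subst hxn
        by_cases hxs : xs = [] <;> cases d <;>
          simp [insPath, hxs, names, entries]
      · have hins : insPath (STree.dir n c r) (x :: xs) d
            = STree.dir n c (insPath r (x :: xs) d) := by
          simp [insPath, hxn]
        have hnf : names (STree.dir n c (insPath r (x :: xs) d))
            = n :: names (insPath r (x :: xs) d) := rfl
        have hn0 : names (STree.dir n c r) = n :: names r := rfl
        rw [hins, hnf, hn0, ihr x xs d]
        by_cases hm : x ∈ names r
        · rw [if_pos hm, if_pos (by simp [hm])]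
        · rw [if_neg hm, if_neg (by simp [hxn, hm]), List.cons_append]

theorem wf_ins : ∀ (parts : List String) (t : STree) (d : Bool), WF t → WF (insPath t parts d) := by
  intro parts
  induction parts with
  | nil => intro t d h; simpa [insPath] using h
  | cons x xs ih =>
      intro t d h
      induction t with
      | nil =>
          by_cases hxs : xs = [] <;> cases d <;>
            simp [insPath, hxs, WF, names, entries] <;>
            exact ih STree.nil _ trivial
      | file n r ihr =>
          obtain ⟨h1, h2⟩ := h
          by_cases hxn : x = n
          · subst hxn
            by_cases hxs : xs = [] <;> cases d <;>
              simp [insPath, hxs, WF, h1, h2] <;>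
              exact ih STree.nil _ trivial
          · have hwr := ihr h2
            have hnames := names_ins r x xs d
            by_cases hm : x ∈ names r <;>
              simp [insPath, hxn, WF, hnames, hm, h1, h2, hwr, Ne.symm hxn]
      | dir n c r _ ihr =>
          obtain ⟨h1, h2, h3⟩ := h
          by_cases hxn : x = n
          · subst hxn
            by_cases hxs : xs = [] <;>
              simp [insPath, hxs, WF, h1, h2, h3]
            exact ih c _ h2
          · have hwr := ihr h3
            have hnames := names_ins r x xs d
            by_cases hm : x ∈ names r <;>
              simp [insPath, hxn, WF, hnames, hm, h1, h2, h3, hwr, Ne.symm hxn]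

theorem specDir_imp (M : List (String × Bool)) (p : List String)
    (h : specMem M p = false) : specDir M p = false := by
  simp only [specMem, List.any_eq_false] at h
  simp only [specDir, List.any_eq_false]
  intro e he
  simp [h e he]

theorem lookup_fold (M : List (String × Bool)) (p : List String) :
    lookup (M.foldl (fun tr q => insPath tr (pvParts q.1) q.2) STree.nil) p =
      if specMem M p then some (specDir M p) else none := by
  induction M using List.reverseRecOn with
  | nil => simp [specMem, lookup_nil]
  | append_singleton M a ihM =>
      rw [List.foldl_append, List.foldl_cons, List.foldl_nil, lookup_ins, ihM]
      have hmem : specMem (M ++ [a]) p = (specMem M p || isPfx p (pvParts a.1)) := by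
        simp [specMem]
      have hdir : specDir (M ++ [a]) p =
          (specDir M p || (isPfx p (pvParts a.1) &&
            (decide (p.length < (pvParts a.1).length) || a.2))) := by
        simp [specDir]
      by_cases h1 : isPfx p (pvParts a.1) = true
      · by_cases h2 : specMem M p = true
        · simp [hmem, hdir, h1, h2, some_beq_some_true]
        · have h2' : specMem M p = false := by simpa using h2
          simp [hmem, hdir, h1, h2', specDir_imp M p h2', none_beq_some_true]
      · have h1' : isPfx p (pvParts a.1) = false := by simpa using h1
        by_cases h2 : specMem M p = true <;>
          simp [hmem, hdir, h1', h2]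

theorem wf_fold_aux : ∀ (M : List (String × Bool)) (t : STree), WF t →
    WF (M.foldl (fun tr q => insPath tr (pvParts q.1) q.2) t) := by
  intro M
  induction M with
  | nil => intro t h; simpa using h
  | cons a M ihM =>
      intro t h
      rw [List.foldl_cons]
      exact ihM _ (wf_ins _ _ _ h)

theorem wf_fold (M : List (String × Bool)) :
    WF (M.foldl (fun tr q => insPath tr (pvParts q.1) q.2) STree.nil) :=
  wf_fold_aux M STree.nil trivial

theorem fst_mem_names (t : STree) (n : String) (oc : Option STree)
    (h : (n, oc) ∈ entries t) : n ∈ names t := by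
  simp only [names, List.mem_map]
  exact ⟨(n, oc), h, rfl⟩

theorem head_mem_names : ∀ (t : STree) (y : String) (ys : List String),
    (y :: ys) ∈ allPaths t → y ∈ names t := by
  intro t
  induction t with
  | nil => intro y ys h; simp [allPaths] at h
  | file n r ihr =>
      intro y ys h
      simp only [allPaths, List.mem_cons] at h
      rcases h with h | h
      · simp only [List.cons.injEq] at h
        simp [names, entries, h.1]
      · have := ihr y ys h
        simp only [names, entries, List.map_cons, List.mem_cons]
        exact Or.inr (by simpa [names] using this)
  | dir n c r _ ihr =>
      intro y ys h
      simp only [allPaths, List.mem_cons, List.mem_append, List.mem_map] at h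
      rcases h with h | ⟨q, _, hq⟩ | h
      · simp only [List.cons.injEq] at h
        simp [names, entries, h.1]
      · simp only [List.cons.injEq] at hq
        simp [names, entries, hq.1]
      · have := ihr y ys h
        simp only [names, entries, List.map_cons, List.mem_cons]
        exact Or.inr (by simpa [names] using this)

theorem allPaths_ne_nil : ∀ (t : STree) (p : List String), p ∈ allPaths t → p ≠ [] := by
  intro t
  induction t with
  | nil => intro p h; simp [allPaths] at h
  | file n r ihr =>
      intro p h
      simp only [allPaths, List.mem_cons] at h
      rcases h with h | h
      · simp [h]
      · exact ihr p h
  | dir n c r _ ihr =>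
      intro p h
      simp only [allPaths, List.mem_cons, List.mem_append, List.mem_map] at h
      rcases h with h | ⟨q, _, hq⟩ | h
      · simp [h]
      · simp [← hq]
      · exact ihr p h

theorem mem_allPaths_iff : ∀ (t : STree), WF t → ∀ (p : List String),
    p ∈ allPaths t ↔ (lookup t p).isSome := by
  intro t
  induction t with
  | nil => intro _ p; simp [allPaths, lookup_nil]
  | file n r ihr =>
      rintro ⟨h1, h2⟩ p
      rcases p with _ | ⟨y, ys⟩
      · simp only [lookup_nil_path, Option.isSome_none, Bool.false_eq_true, iff_false,
          allPaths, List.mem_cons]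
        rintro (h | h)
        · simp at h
        · exact absurd rfl (allPaths_ne_nil r [] h)
      · by_cases hyn : y = n
        · subst hyn
          rcases ys with _ | ⟨z, zs⟩
          · simp [allPaths, lookup]
          · have hlk : lookup (STree.file y r) (y :: z :: zs) = none := by
              simp [lookup]
            rw [hlk]
            simp only [allPaths, List.mem_cons, Option.isSome_none, Bool.false_eq_true,
              iff_false]
            rintro (h | h)
            · simp at h
            · exact h1 (head_mem_names r _ _ h)
        · have hlk : lookup (STree.file n r) (y :: ys) = lookup r (y :: ys) := by
            simp [lookup, hyn]
          rw [hlk, ← ihr h2]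
          simp only [allPaths, List.mem_cons]
          constructor
          · rintro (h | h)
            · simp only [List.cons.injEq] at h
              exact absurd h.1 hyn
            · exact h
          · exact Or.inr
  | dir n c r ihc ihr =>
      rintro ⟨h1, h2, h3⟩ p
      rcases p with _ | ⟨y, ys⟩
      · simp only [lookup_nil_path, Option.isSome_none, Bool.false_eq_true, iff_false,
          allPaths, List.mem_cons, List.mem_append, List.mem_map]
        rintro (h | ⟨q, _, hq⟩ | h)
        · simp at h
        · simp at hq
        · exact absurd rfl (allPaths_ne_nil r [] h)
      · by_cases hyn : y = n
        · subst hyn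
          rcases ys with _ | ⟨z, zs⟩
          · simp [allPaths, lookup]
          · have hlk : lookup (STree.dir y c r) (y :: z :: zs) = lookup c (z :: zs) := by
              simp [lookup]
            rw [hlk, ← ihc h2]
            simp only [allPaths, List.mem_cons, List.mem_append, List.mem_map]
            constructor
            · rintro (h | ⟨q, hq, hq2⟩ | h)
              · simp at h
              · simp only [List.cons.injEq, true_and] at hq2
                rwa [hq2] at hq
              · exact absurd (head_mem_names r _ _ h) h1
            · intro h
              exact Or.inr (Or.inl ⟨z :: zs, h, rfl⟩)
        · have hlk : lookup (STree.dir n c r) (y :: ys) = lookup r (y :: ys) := by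
            simp [lookup, hyn]
          rw [hlk, ← ihr h3]
          simp only [allPaths, List.mem_cons, List.mem_append, List.mem_map]
          constructor
          · rintro (h | ⟨q, _, hq⟩ | h)
            · simp only [List.cons.injEq] at h
              exact absurd h.1 hyn
            · simp only [List.cons.injEq] at hq
              exact absurd hq.1.symm hyn
            · exact h
          · intro h
            exact Or.inr (Or.inr h)

theorem names_nodup : ∀ (t : STree), WF t → (names t).Nodup := by
  intro t
  induction t with
  | nil => intro _; simp [names, entries]
  | file n r ihr =>
      rintro ⟨h1, h2⟩
      simp only [names, entries, List.map_cons, List.nodup_cons]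
      exact ⟨by simpa [names] using h1, by simpa [names] using ihr h2⟩
  | dir n c r _ ihr =>
      rintro ⟨h1, h2, h3⟩
      simp only [names, entries, List.map_cons, List.nodup_cons]
      exact ⟨by simpa [names] using h1, by simpa [names] using ihr h3⟩

theorem nodup_allPaths : ∀ (t : STree), WF t → (allPaths t).Nodup := by
  intro t
  induction t with
  | nil => intro _; simp [allPaths]
  | file n r ihr =>
      rintro ⟨h1, h2⟩
      simp only [allPaths, List.nodup_cons]
      refine ⟨?_, ihr h2⟩
      intro h
      exact h1 (head_mem_names r n [] h)
  | dir n c r ihc ihr =>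
      rintro ⟨h1, h2, h3⟩
      simp only [allPaths, List.nodup_cons]
      constructor
      · intro h
        simp only [List.mem_append, List.mem_map] at h
        rcases h with ⟨q, hq, hq2⟩ | h
        · simp only [List.cons.injEq] at hq2
          have := allPaths_ne_nil c q hq
          simp_all
        · exact h1 (head_mem_names r n [] h)
      · refine List.Nodup.append ?_ (ihr h3) ?_
        · exact (ihc h2).map (fun a b hab => by simpa using hab)
        · intro q hq hq2
          simp only [List.mem_map] at hq
          obtain ⟨q', _, hq'⟩ := hq
          rw [← hq'] at hq2
          exact h1 (head_mem_names r n q' hq2)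

theorem wf_child : ∀ (t : STree), WF t → ∀ (n : String) (c : STree),
    (n, some c) ∈ entries t → WF c := by
  intro t
  induction t with
  | nil => intro _ n c h; simp [entries] at h
  | file m r ihr =>
      rintro ⟨-, h2⟩ n c h
      simp only [entries, List.mem_cons, Prod.mk.injEq] at h
      rcases h with ⟨-, h⟩ | h
      · exact absurd h (by simp)
      · exact ihr h2 n c h
  | dir m c' r ihc ihr =>
      rintro ⟨-, h2, h3⟩ n c h
      simp only [entries, List.mem_cons, Prod.mk.injEq, Option.some.injEq] at h
      rcases h with ⟨-, h⟩ | h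
      · subst h; exact h2
      · exact ihr h3 n c h

theorem lookup_entry : ∀ (t : STree), WF t → ∀ (n : String) (oc : Option STree),
    (n, oc) ∈ entries t → ∀ (q : List String),
    lookup t (n :: q) =
      if q = [] then some oc.isSome
      else (match oc with | none => none | some c => lookup c q) := by
  intro t
  induction t with
  | nil => intro _ n oc h; simp [entries] at h
  | file m r ihr =>
      rintro ⟨h1, h2⟩ n oc h q
      simp only [entries, List.mem_cons, Prod.mk.injEq] at h
      rcases h with ⟨he1, he2⟩ | h
      · subst he1; subst he2
        simp [lookup]
      · have hne : ¬ (n = m) := by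
          intro e; subst e
          exact h1 (fst_mem_names _ _ _ h)
        simp only [lookup, if_neg hne]
        exact ihr h2 n oc h q
  | dir m c r _ ihr =>
      rintro ⟨h1, h2, h3⟩ n oc h q
      simp only [entries, List.mem_cons, Prod.mk.injEq] at h
      rcases h with ⟨he1, he2⟩ | h
      · subst he1; subst he2
        simp [lookup]
      · have hne : ¬ (n = m) := by
          intro e; subst e
          exact h1 (fst_mem_names _ _ _ h)
        simp only [lookup, if_neg hne]
        exact ihr h3 n oc h q

theorem allPaths_flatMap : ∀ (t : STree), allPaths t = (entries t).flatMap blockP := by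
  intro t
  induction t with
  | nil => simp [allPaths, entries]
  | file n r ihr => simp [allPaths, entries, blockP, ihr]
  | dir n c r _ ihr => simp [allPaths, entries, blockP, ihr]

theorem sorted_strict (l : List (List String)) (h : l.Nodup) :
    List.Pairwise (fun a b : List String => a < b) (PySem.List.sorted l (fun q => q) false) := by
  have h1 : List.Pairwise (fun a b : List String => a ≤ b)
      (PySem.List.sorted l (fun q => q) false) := by
    have h' := PySem.List.sorted_pairwise l (fun q : List String => q)
    convert h' using 2
  have h2 : (PySem.List.sorted l (fun q => q) false).Nodup :=
    (PySem.List.sorted_perm l (fun q => q) false).nodup_iff.mpr h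
  have h2' : List.Pairwise (fun a b : List String => a ≠ b)
      (PySem.List.sorted l (fun q => q) false) := h2
  exact (h1.and h2').imp (fun hab => lt_of_le_of_ne hab.1 hab.2)

theorem mem_blockS (e : String × Option STree) (x : List String) (h : x ∈ blockS e) :
    ∃ q, x = e.1 :: q := by
  obtain ⟨n, oc⟩ := e
  cases oc with
  | none => simp only [blockS] at h; simp at h; exact ⟨[], by simp [h]⟩
  | some c =>
      simp only [blockS, List.mem_cons, List.mem_map] at h
      rcases h with h | ⟨q, _, hq⟩
      · exact ⟨[], by simp [h]⟩
      · exact ⟨q, hq.symm⟩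

theorem list_lt_cons_of_head (a b : String) (q1 q2 : List String) (h : a < b) :
    (a :: q1) < (b :: q2) :=
  List.Lex.rel h

theorem list_lt_cons_cons (a : String) (q1 q2 : List String) (h : q1 < q2) :
    (a :: q1) < (a :: q2) :=
  List.Lex.cons h

theorem list_lt_singleton_cons (a : String) (z : String) (zs : List String) :
    ([a] : List String) < (a :: z :: zs) :=
  List.Lex.cons List.Lex.nil

theorem sorted_allPaths_decomp (t : STree) (h : WF t) :
    PySem.List.sorted (allPaths t) (fun q => q) false =
      (PySem.List.sorted (entries t) (fun e => e.1) false).flatMap blockS := by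
  have hmain := PySem.List.sorted_eq_of_perm_of_pairwise_lt (allPaths t)
      ((PySem.List.sorted (entries t) (fun e => e.1) false).flatMap blockS)
      (fun q : List String => q) ?hperm ?hpair
  · convert hmain using 2
  case hperm =>
    rw [allPaths_flatMap]
    refine List.Perm.flatMap (PySem.List.sorted_perm _ _ _) ?_
    intro e _
    obtain ⟨n, oc⟩ := e
    cases oc with
    | none => simp [blockS, blockP]
    | some c =>
        simp only [blockS, blockP]
        exact List.Perm.cons _ (List.Perm.map _ (PySem.List.sorted_perm _ _ _))
  case hpair =>
    rw [List.pairwise_flatMap]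
    constructor
    · intro e he
      have he' : e ∈ entries t := by
        rw [PySem.List.mem_sorted] at he; exact he
      obtain ⟨n, oc⟩ := e
      cases oc with
      | none => simp [blockS]
      | some c =>
          have hwfc : WF c := wf_child t h n c he'
          have hstrict := sorted_strict (allPaths c) (nodup_allPaths c hwfc)
          simp only [blockS, List.pairwise_cons]
          constructor
          · intro y hy
            simp only [List.mem_map] at hy
            obtain ⟨q, hq, hq2⟩ := hy
            have hqa : q ∈ allPaths c := by
              rw [PySem.List.mem_sorted] at hq; exact hq
            have hqne := allPaths_ne_nil c q hqa
            rcases q with _ | ⟨z, zs⟩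
            · exact absurd rfl hqne
            · rw [← hq2]
              exact list_lt_singleton_cons n z zs
          · rw [List.pairwise_map]
            exact hstrict.imp (fun hab => list_lt_cons_cons n _ _ hab)
    · have h1 : List.Pairwise (fun a b : String × Option STree => a.1 ≤ b.1)
          (PySem.List.sorted (entries t) (fun e => e.1) false) :=
        PySem.List.sorted_pairwise (entries t) (fun e => e.1)
      have hper : ((PySem.List.sorted (entries t) (fun e => e.1) false).map
          (fun e => e.1)).Perm (names t) := by
        simpa [names] using
          (List.Perm.map (fun e : String × Option STree => e.1)
            (PySem.List.sorted_perm (entries t) (fun e => e.1) false))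
      have h2 : ((PySem.List.sorted (entries t) (fun e => e.1) false).map
          (fun e => e.1)).Nodup := hper.nodup_iff.mpr (names_nodup t h)
      have h3 : List.Pairwise (fun a b : String × Option STree => a.1 ≠ b.1)
          (PySem.List.sorted (entries t) (fun e => e.1) false) :=
        List.pairwise_map.mp h2
      have hfst : List.Pairwise (fun a b : String × Option STree => a.1 < b.1)
          (PySem.List.sorted (entries t) (fun e => e.1) false) :=
        (h1.and h3).imp (fun hab => lt_of_le_of_ne hab.1 hab.2)
      refine hfst.imp ?_
      intro a b hab x hx y hy
      obtain ⟨q1, hq1⟩ := mem_blockS a x hx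
      obtain ⟨q2, hq2⟩ := mem_blockS b y hy
      rw [hq1, hq2]
      exact list_lt_cons_of_head _ _ _ _ hab

theorem pyGet_neg_one_singleton (a : String) :
    PySem.List.pyGet? [a] (-1 : Int) = some a := by
  simp [PySem.List.pyGet?, PySem.List.pyIdx?]

theorem pyGet_neg_one_cons (a : String) (q : List String) (h : q ≠ []) :
    PySem.List.pyGet? (a :: q) (-1 : Int) = PySem.List.pyGet? q (-1 : Int) := by
  rcases q with _ | ⟨z, zs⟩
  · exact absurd rfl h
  · simp only [PySem.List.pyGet?, PySem.List.pyIdx?, List.length_cons]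
    norm_num
    rfl

set_option maxHeartbeats 1000000 in
theorem walk_char : ∀ (N : Nat) (t : STree), tsize t ≤ N → WF t → ∀ (pre : String),
    walk t pre = (PySem.List.sorted (allPaths t) (fun q => q) false).map
      (fun p => pre ++ (pvSpaces (p.length - 1) ++ (PySem.List.pyGet? p (-1 : Int)).getD "" ++
        (if lookup t p = some true then "/" else ""))) := by
  intro N
  induction N with
  | zero =>
      intro t ht
      exact absurd ht (by cases t <;> simp [tsize])
  | succ N ihN =>
      intro t ht hwf pre
      rw [walk, sorted_allPaths_decomp t hwf, List.map_flatMap]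
      have main : ∀ es : List (String × Option STree), (∀ e ∈ es, e ∈ entries t) →
          walkGo es pre = es.flatMap (fun e => (blockS e).map
            (fun p => pre ++ (pvSpaces (p.length - 1) ++
              (PySem.List.pyGet? p (-1 : Int)).getD "" ++
              (if lookup t p = some true then "/" else "")))) := by
        intro es
        induction es with
        | nil => simp [walkGo]
        | cons e rest ihes =>
            intro hmem
            obtain ⟨n, oc⟩ := e
            have hin : (n, oc) ∈ entries t := hmem _ (by simp)
            have hrest : ∀ e ∈ rest, e ∈ entries t :=
              fun x hx => hmem x (List.mem_cons_of_mem _ hx)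
            have hl := lookup_entry t hwf n oc hin
            cases oc with
            | none =>
                rw [walkGo, ihes hrest]
                simp only [blockS, List.flatMap_cons, List.map_cons, List.map_nil]
                congr 1
                have h0 := hl []
                rw [if_pos rfl] at h0
                simp only [Option.isSome_none] at h0
                rw [h0]
                simp [pvSpaces, pyGet_neg_one_singleton, String.empty_append]
            | some c =>
                have hwfc : WF c := wf_child t hwf n c hin
                have hsz : tsize c ≤ N := by
                  have := tsize_of_mem_entries hin
                  omega
                have hchild := ihN c hsz hwfc (pre ++ "  ")
                rw [walk] at hchild
                rw [walkGo, hchild, ihes hrest]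
                simp only [blockS, List.flatMap_cons, List.map_cons, List.map_map]
                congr 1
                · have h0 := hl []
                  rw [if_pos rfl] at h0
                  simp only [Option.isSome_some] at h0
                  rw [h0]
                  simp [pvSpaces, pyGet_neg_one_singleton, String.empty_append,
                    String.append_assoc]
                congr 1
                apply List.map_congr_left
                intro q hq
                have hqa : q ∈ allPaths c := by
                  rw [PySem.List.mem_sorted] at hq; exact hq
                have hqne := allPaths_ne_nil c q hqa
                have hlq := hl q
                rw [if_neg hqne] at hlq
                simp only [Function.comp_apply]
                rw [hlq, pyGet_neg_one_cons n q hqne]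
                have hlen : (n :: q).length - 1 = (q.length - 1) + 1 := by
                  rcases q with _ | ⟨z, zs⟩
                  · exact absurd rfl hqne
                  · simp
                rw [hlen]
                show (pre ++ "  ") ++ _ = pre ++ (pvSpaces ((q.length - 1) + 1) ++ _ ++ _)
                simp [pvSpaces, String.append_assoc]
      rw [main _ (fun e he => by rw [PySem.List.mem_sorted] at he; exact he)]

-- ===== B side =====

theorem optBool_getD (o : Option Bool) : o.getD false = (o == some true) := by
  cases o with
  | none => rfl
  | some b => cases b <;> rfl

theorem dict_getD_get? (d : PySem.Dict (List String) Bool) (k : List String) :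
    d.getD k false = ((d.get? k).getD false) := rfl

theorem addPath_chain (n : Nat) (b : Bool) (p : List String) :
    ∀ (ps : List String) (acc : List String) (d : PySem.Dict (List String) Bool),
    ((ps.foldl (fun s x =>
        let t := s.1 ++ [x]
        (t, s.2.insert t ((s.2.getD t false || decide (t.length < n)) || b)))
      (acc, d)).2).get? p =
      if acc.length < p.length ∧ p.length ≤ acc.length + ps.length ∧
          p = acc ++ ps.take (p.length - acc.length) then
        some ((d.get? p == some true) || (decide (p.length < n) || b))
      else d.get? p := by
  intro ps
  induction ps with
  | nil =>
      intro acc d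
      rw [List.foldl_nil, if_neg]
      rintro ⟨h1, h2, -⟩
      simp only [List.length_nil, Nat.add_zero] at h2
      omega
  | cons z zs ihz =>
      intro acc d
      rw [List.foldl_cons, ihz]
      by_cases hp1 : p = acc ++ [z]
      · subst hp1
        rw [if_neg (by
              rintro ⟨h1, -, -⟩
              simp only [List.length_append, List.length_cons, List.length_nil] at h1
              omega)]
        rw [if_pos ⟨by simp, by simp only [List.length_append, List.length_cons,
              List.length_nil]; omega, by
              have h1 : ((acc ++ [z]).length - acc.length) = 1 := by simp
              rw [h1]
              simp⟩]
        rw [PySem.Dict.get?_insert_self]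
        congr 1
        rw [dict_getD_get?, optBool_getD, Bool.or_assoc]
      · have hne : ((d.insert (acc ++ [z])
            ((d.getD (acc ++ [z]) false || decide ((acc ++ [z]).length < n)) || b)).get? p)
            = d.get? p := PySem.Dict.get?_insert_of_ne _ _ hp1
        by_cases hp2 : (acc ++ [z]).length < p.length ∧
            p.length ≤ (acc ++ [z]).length + zs.length ∧
            p = (acc ++ [z]) ++ zs.take (p.length - (acc ++ [z]).length)
        · obtain ⟨h1, h2, h3⟩ := hp2
          have h1' : acc.length + 1 < p.length := by simpa using h1
          have h2' : p.length ≤ acc.length + 1 + zs.length := by simpa using h2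
          have harith : p.length - acc.length = (p.length - (acc ++ [z]).length) + 1 := by
            simp only [List.length_append, List.length_cons, List.length_nil]
            omega
          have hcond : acc.length < p.length ∧ p.length ≤ acc.length + (z :: zs).length ∧
              p = acc ++ (z :: zs).take (p.length - acc.length) := by
            refine ⟨by omega, by simp only [List.length_cons]; omega, ?_⟩
            calc p = (acc ++ [z]) ++ zs.take (p.length - (acc ++ [z]).length) := h3
              _ = acc ++ (z :: zs).take (p.length - acc.length) := by
                  rw [harith, List.take_succ_cons, List.append_assoc, List.singleton_append]
          rw [if_pos ⟨h1, h2, h3⟩, if_pos hcond, hne]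
        · have hc : ¬ (acc.length < p.length ∧ p.length ≤ acc.length + (z :: zs).length ∧
              p = acc ++ (z :: zs).take (p.length - acc.length)) := by
            rintro ⟨h1, h2, h3⟩
            simp only [List.length_cons] at h2
            rcases Nat.lt_or_ge (p.length - acc.length) 2 with hk2 | hk2
            · apply hp1
              have hk : p.length - acc.length = 1 := by omega
              rw [hk] at h3
              simpa using h3
            · apply hp2
              have harith : p.length - acc.length = (p.length - (acc ++ [z]).length) + 1 := by
                simp only [List.length_append, List.length_cons, List.length_nil]
                omega
              refine ⟨by (simp only [List.length_append, List.length_cons,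
                  List.length_nil]; omega),
                by (simp only [List.length_append, List.length_cons, List.length_nil]; omega),
                ?_⟩
              calc p = acc ++ (z :: zs).take (p.length - acc.length) := h3
                _ = (acc ++ [z]) ++ zs.take (p.length - (acc ++ [z]).length) := by
                    rw [harith, List.take_succ_cons, List.append_assoc, List.singleton_append]
          rw [if_neg hp2, if_neg hc]
          exact hne

theorem addPath_get? (d : PySem.Dict (List String) Bool) (parts : List String) (b : Bool)
    (p : List String) :
    (addPath d parts b).get? p =
      if isPfx p parts then
        some ((d.get? p == some true) || (decide (p.length < parts.length) || b))
      else d.get? p := by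
  rw [addPath, addPath_chain parts.length b p parts [] d]
  have hiff : (([] : List String).length < p.length ∧
      p.length ≤ ([] : List String).length + parts.length ∧
      p = [] ++ parts.take (p.length - ([] : List String).length)) ↔ isPfx p parts = true := by
    rw [isPfx_iff]
    simp only [List.length_nil, List.nil_append, Nat.zero_add, Nat.sub_zero,
      List.length_pos_iff]
  by_cases h : isPfx p parts = true
  · rw [if_pos (hiff.mpr h), if_pos h]
  · rw [if_neg (fun hc => h (hiff.mp hc)), if_neg h]

theorem addPath_nodup_aux (n : Nat) (b : Bool) :
    ∀ (ps : List String) (acc : List String) (d : PySem.Dict (List String) Bool),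
    d.keys.Nodup →
    ((ps.foldl (fun s x =>
        let t := s.1 ++ [x]
        (t, s.2.insert t ((s.2.getD t false || decide (t.length < n)) || b)))
      (acc, d)).2).keys.Nodup := by
  intro ps
  induction ps with
  | nil => intro acc d h; simpa using h
  | cons z zs ihz =>
      intro acc d h
      rw [List.foldl_cons]
      exact ihz _ _ (PySem.Dict.nodup_keys_insert _ _ _ h)

theorem addPath_nodup (d : PySem.Dict (List String) Bool) (parts : List String) (b : Bool)
    (h : d.keys.Nodup) : (addPath d parts b).keys.Nodup :=
  addPath_nodup_aux parts.length b parts [] d h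

theorem nodes_fold (L : List (String × Bool)) (p : List String) :
    ((L.foldl (fun d q => addPath d (pvParts q.1) q.2) PySem.Dict.empty).get? p) =
      if specMem L p then some (specDir L p) else none := by
  induction L using List.reverseRecOn with
  | nil => simp [specMem, PySem.Dict.get?_empty]
  | append_singleton M a ihM =>
      rw [List.foldl_append, List.foldl_cons, List.foldl_nil, addPath_get?, ihM]
      have hmem : specMem (M ++ [a]) p = (specMem M p || isPfx p (pvParts a.1)) := by
        simp [specMem]
      have hdir : specDir (M ++ [a]) p =
          (specDir M p || (isPfx p (pvParts a.1) &&
            (decide (p.length < (pvParts a.1).length) || a.2))) := by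
        simp [specDir]
      by_cases h1 : isPfx p (pvParts a.1) = true
      · by_cases h2 : specMem M p = true
        · simp [hmem, hdir, h1, h2, some_beq_some_true]
        · have h2' : specMem M p = false := by simpa using h2
          simp [hmem, hdir, h1, h2', specDir_imp M p h2', none_beq_some_true]
      · have h1' : isPfx p (pvParts a.1) = false := by simpa using h1
        by_cases h2 : specMem M p = true <;>
          simp [hmem, hdir, h1', h2]

theorem nodes_nodup_aux : ∀ (L : List (String × Bool)) (d : PySem.Dict (List String) Bool),
    d.keys.Nodup → (L.foldl (fun d q => addPath d (pvParts q.1) q.2) d).keys.Nodup := by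
  intro L
  induction L with
  | nil => intro d h; simpa using h
  | cons a L ihL =>
      intro d h
      rw [List.foldl_cons]
      exact ihL _ (addPath_nodup _ _ _ h)

theorem nodes_nodup (L : List (String × Bool)) :
    (L.foldl (fun d q => addPath d (pvParts q.1) q.2) PySem.Dict.empty).keys.Nodup :=
  nodes_nodup_aux L PySem.Dict.empty (by simp [PySem.Dict.empty, PySem.Dict.keys])

theorem spec_sorted_mem (L : List (String × Bool)) (p : List String) :
    specMem (PySem.List.sorted L (fun x => x.1) false) p = specMem L p :=
  List.Perm.any_eq (PySem.List.sorted_perm L (fun x => x.1) false)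

theorem spec_sorted_dir (L : List (String × Bool)) (p : List String) :
    specDir (PySem.List.sorted L (fun x => x.1) false) p = specDir L p :=
  List.Perm.any_eq (PySem.List.sorted_perm L (fun x => x.1) false)

-- ===== VERDICT (by name: the statement is the Claim_ definition above) =====
theorem render_structure_tree_spec : Claim_equal_render_structure_tree := by
  intro paths _hdom
  show render_structure_tree paths = render_structure_tree_alt paths
  have htree := wf_fold (PySem.List.sorted paths (fun x => x.1) false)
  set tree := (PySem.List.sorted paths (fun x => x.1) false).foldl
      (fun tr p => insPath tr (pvParts p.1) p.2) STree.nil with hdef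
  set nodes := paths.foldl (fun d p => addPath d (pvParts p.1) p.2) PySem.Dict.empty
    with hndef
  have hA : render_structure_tree paths = walk tree "" := rfl
  have hB : render_structure_tree_alt paths =
      (PySem.List.sorted nodes.keys (fun t => t) false).map (fun t =>
        pvSpaces (t.length - 1) ++ (PySem.List.pyGet? t (-1)).getD "" ++
          (if nodes.getD t false then "/" else "")) := rfl
  rw [hA, hB, walk_char (tsize tree) tree le_rfl htree ""]
  have hlk : ∀ p, lookup tree p = nodes.get? p := by
    intro p
    rw [hdef, hndef, lookup_fold, nodes_fold, spec_sorted_mem, spec_sorted_dir]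
  have hperm : (allPaths tree).Perm nodes.keys := by
    rw [List.perm_ext_iff_of_nodup (nodup_allPaths tree htree)
      (by rw [hndef]; exact nodes_nodup paths)]
    intro p
    rw [mem_allPaths_iff tree htree p, hlk p]
    constructor
    · intro h
      by_contra hmemk
      have := (PySem.Dict.get?_eq_none_iff_not_mem_keys nodes p).mpr hmemk
      rw [this] at h
      simp at h
    · intro h
      rcases ho : nodes.get? p with _ | b
      · exact absurd h ((PySem.Dict.get?_eq_none_iff_not_mem_keys nodes p).mp ho)
      · simp [ho]
  have hsorted : PySem.List.sorted (allPaths tree) (fun q => q) false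
      = PySem.List.sorted nodes.keys (fun q => q) false := by
    have h := PySem.List.sorted_eq_sorted_of_perm (allPaths tree) nodes.keys
      (fun q : List String => q) (fun a b hab => hab) hperm
    convert h using 2
  rw [hsorted]
  apply List.map_congr_left
  intro p hp
  have hpk : p ∈ nodes.keys := by
    rw [PySem.List.mem_sorted] at hp; exact hp
  rcases ho : nodes.get? p with _ | b
  · exact absurd hpk ((PySem.Dict.get?_eq_none_iff_not_mem_keys nodes p).mp ho)
  · rw [hlk p, ho, dict_getD_get?, ho]
    cases b <;> simp [String.empty_append, String.append_assoc]
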